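-- pv_equiv track=rewrite | github.com/L1saM/DADSAassignmentB_Year2 | Task 1.py | sorting_patient_weight
-- ===== SOURCE A (Python) =====
-- def sorting_patient_weight(arr):
--     sorting = [[], [], [], []]
--     for i in range(len(arr)):
--         if "Obese" in arr[i]:
--             sorting[0].append(arr[i])
--         elif "Underweight" in arr[i]:
--             sorting[1].append(arr[i])
--         elif "Overweight" in arr[i]:
--             sorting[2].append(arr[i])
--         elif "Normal" in arr[i]:
--             sorting[3].append(arr[i])
--
--     rows = []
--     for item in sorting:
--         rows.extend(item)
--
--     return rows
-- ===== SOURCE B (Python) =====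
-- def _category(s):
--     if "Obese" in s:
--         return 0
--     if "Underweight" in s:
--         return 1
--     if "Overweight" in s:
--         return 2
--     if "Normal" in s:
--         return 3
--     return None
--
--
-- def sorting_patient_weight(arr):
--     kept = [s for s in arr if _category(s) is not None]
--     return sorted(kept, key=_category)
-- ===== Notes on version B (the rewrite author's own statement) =====
-- stated objective: idiomatic
-- what changed: Replaces explicit four-bucket accumulation and concatenation with a classifier key function, a filter dropping unmatched strings, and one stable key-sort that preserves in-category order.
import Mathlib
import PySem

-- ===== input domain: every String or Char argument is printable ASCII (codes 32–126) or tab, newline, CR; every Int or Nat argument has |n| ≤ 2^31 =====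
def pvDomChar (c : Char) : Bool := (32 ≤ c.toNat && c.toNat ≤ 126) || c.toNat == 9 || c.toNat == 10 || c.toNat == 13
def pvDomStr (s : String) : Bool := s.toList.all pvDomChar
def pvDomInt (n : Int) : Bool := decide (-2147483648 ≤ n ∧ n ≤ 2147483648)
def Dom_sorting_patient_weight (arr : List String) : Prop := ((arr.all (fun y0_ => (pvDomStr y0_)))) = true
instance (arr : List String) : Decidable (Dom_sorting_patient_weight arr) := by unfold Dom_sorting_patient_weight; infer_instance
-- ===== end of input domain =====

-- B replaces A's explicit four-bucket accumulation with a classifier key, a filter, and one stable key-sort (objective: idiomatic).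

-- ===== PORT A =====
-- the body of A's index loop (branches in A's order)
def pvStepA (st : List String × List String × List String × List String) (x : String) :
    List String × List String × List String × List String :=
  if PySem.Str.isIn "Obese" x then (st.1 ++ [x], st.2.1, st.2.2.1, st.2.2.2)
  else if PySem.Str.isIn "Underweight" x then (st.1, st.2.1 ++ [x], st.2.2.1, st.2.2.2)
  else if PySem.Str.isIn "Overweight" x then (st.1, st.2.1, st.2.2.1 ++ [x], st.2.2.2)
  else if PySem.Str.isIn "Normal" x then (st.1, st.2.1, st.2.2.1, st.2.2.2 ++ [x])
  else st

-- the rows loop: 'for item in sorting: rows.extend(item)'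
def pvRowsA (sorting : List String × List String × List String × List String) : List String :=
  ([sorting.1, sorting.2.1, sorting.2.2.1, sorting.2.2.2]).foldl
    (fun rows item => rows ++ item) []

def sorting_patient_weight (arr : List String) : List String :=
  pvRowsA
    ((PySem.List.pyRange 0 (PySem.List.len arr)).foldl
      (fun st i => pvStepA st (PySem.List.pyGetD arr i "")) ([], [], [], []))

-- ===== PORT B =====
-- _category: first-match priority if-chain; none = no keyword
def pvCat? (s : String) : Option Int :=
  if PySem.Str.isIn "Obese" s then some 0
  else if PySem.Str.isIn "Underweight" s then some 1
  else if PySem.Str.isIn "Overweight" s then some 2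
  else if PySem.Str.isIn "Normal" s then some 3
  else none

def sorting_patient_weight_alt (arr : List String) : List String :=
  PySem.List.sorted (arr.filter (fun s => (pvCat? s).isSome))
    (fun s => (pvCat? s).getD 4) false

-- ===== PRECONDITION & SPEC =====
def Spec_sorting_patient_weight (arr : List String) (out : List String) : Prop := out = sorting_patient_weight_alt arr
instance (arr : List String) (out : List String) : Decidable (Spec_sorting_patient_weight arr out) := by unfold Spec_sorting_patient_weight; infer_instance

-- ===== CLAIM (what is proved, stated in full; the proofs are below) =====
def Claim_equal_sorting_patient_weight : Prop := ∀ (arr : List String), Dom_sorting_patient_weight arr → Spec_sorting_patient_weight arr (sorting_patient_weight arr)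

-- ===== LEMMAS AND PROOFS =====

-- the sort key of B
def pvK (s : String) : Int := (pvCat? s).getD 4

lemma pvK_nonneg (s : String) : 0 ≤ pvK s := by
  unfold pvK pvCat?
  split_ifs <;> simp

lemma pvK_lt_of_isSome (s : String) (h : (pvCat? s).isSome = true) : pvK s < 4 := by
  unfold pvK
  unfold pvCat? at h ⊢
  split_ifs at h ⊢ <;> simp_all

lemma isSome_of_pvK_lt (s : String) (h : pvK s < 4) : (pvCat? s).isSome = true := by
  unfold pvK at h
  unfold pvCat? at h ⊢
  split_ifs at h ⊢ <;> simp_all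

-- A's loop builds exactly the four key-filtered sublists
lemma loopA_filter (l : List String) (a b c d : List String) :
    l.foldl pvStepA (a, b, c, d) =
      (a ++ l.filter (fun s => pvK s == 0), b ++ l.filter (fun s => pvK s == 1),
       c ++ l.filter (fun s => pvK s == 2), d ++ l.filter (fun s => pvK s == 3)) := by
  induction l generalizing a b c d with
  | nil => simp
  | cons x t ih =>
    simp only [List.foldl_cons, List.filter_cons]
    by_cases h0 : PySem.Str.isIn "Obese" x = true <;>
      by_cases h1 : PySem.Str.isIn "Underweight" x = true <;>
        by_cases h2 : PySem.Str.isIn "Overweight" x = true <;>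
          by_cases h3 : PySem.Str.isIn "Normal" x = true <;>
    · simp only [PySem.Str.isIn, String.toList] at h0 h1 h2 h3
      have hs : pvStepA (a, b, c, d) x = pvStepA (a, b, c, d) x := rfl
      rw [show pvStepA (a, b, c, d) x =
            (if PySem.Chars.isIn "Obese".toList x.toList then (a ++ [x], b, c, d)
             else if PySem.Chars.isIn "Underweight".toList x.toList then (a, b ++ [x], c, d)
             else if PySem.Chars.isIn "Overweight".toList x.toList then (a, b, c ++ [x], d)
             else if PySem.Chars.isIn "Normal".toList x.toList then (a, b, c, d ++ [x])
             else (a, b, c, d)) from rfl]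
      have hkv : pvK x = (if PySem.Chars.isIn "Obese".toList x.toList then (0 : Int)
             else if PySem.Chars.isIn "Underweight".toList x.toList then 1
             else if PySem.Chars.isIn "Overweight".toList x.toList then 2
             else if PySem.Chars.isIn "Normal".toList x.toList then 3
             else 4) := by
        unfold pvK pvCat? PySem.Str.isIn
        split_ifs <;> simp
      simp only [String.toList] at hkv ⊢
      simp [h0, h1, h2, h3, ih, hkv]

-- insertBy skips a prefix the new element does not go before
lemma insertBy_append_of_not_before (before : String → String → Bool) (x : String)
    (p r : List String) (hp : ∀ y ∈ p, before x y = false) :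
    PySem.List.insertBy before x (p ++ r) = p ++ PySem.List.insertBy before x r := by
  induction p with
  | nil => simp
  | cons y t ih =>
    have hy : before x y = false := hp y (by simp)
    simp only [List.cons_append, PySem.List.insertBy, hy]
    rw [ih (fun z hz => hp z (by simp [hz]))]
    simp

-- insertBy puts the element in front when it goes before the (possible) head
lemma insertBy_cons_of_before (before : String → String → Bool) (x : String)
    (r : List String) (hr : ∀ y ∈ r, before x y = true) :
    PySem.List.insertBy before x r = x :: r := by
  cases r with
  | nil => rfl
  | cons y t => simp [PySem.List.insertBy, hr y (by simp)]

-- bucket invariant for B's stable insertion sort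
lemma foldl_insert_buckets (l : List String) (b0 b1 b2 b3 : List String)
    (h0 : ∀ y ∈ b0, pvK y = 0) (h1 : ∀ y ∈ b1, pvK y = 1)
    (h2 : ∀ y ∈ b2, pvK y = 2) (h3 : ∀ y ∈ b3, pvK y = 3)
    (hl : ∀ x ∈ l, pvK x < 4) :
    l.foldl (fun acc x => PySem.List.insertBy (fun a b => decide (pvK a < pvK b)) x acc)
        (b0 ++ b1 ++ b2 ++ b3) =
      (b0 ++ l.filter (fun s => pvK s == 0)) ++ (b1 ++ l.filter (fun s => pvK s == 1)) ++
      (b2 ++ l.filter (fun s => pvK s == 2)) ++ (b3 ++ l.filter (fun s => pvK s == 3)) := by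
  induction l generalizing b0 b1 b2 b3 with
  | nil => simp
  | cons x t ih =>
    have hx4 : pvK x < 4 := hl x (by simp)
    have hx0 : 0 ≤ pvK x := pvK_nonneg x
    have ht : ∀ y ∈ t, pvK y < 4 := fun y hy => hl y (by simp [hy])
    simp only [List.foldl_cons, List.filter_cons]
    interval_cases hk : (pvK x)
    · have hins : PySem.List.insertBy (fun a b => decide (pvK a < pvK b)) x
          (b0 ++ b1 ++ b2 ++ b3) = b0 ++ (x :: (b1 ++ b2 ++ b3)) := by
        rw [show b0 ++ b1 ++ b2 ++ b3 = b0 ++ (b1 ++ b2 ++ b3) by simp,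
          insertBy_append_of_not_before _ _ _ _
            (fun y hy => by simp [hk, h0 y hy]),
          insertBy_cons_of_before _ _ _
            (fun y hy => by
              rcases List.mem_append.1 hy with hy | hy
              · rcases List.mem_append.1 hy with hy | hy
                · simp [hk, h1 y hy]
                · simp [hk, h2 y hy]
              · simp [hk, h3 y hy])]
      rw [hins, show b0 ++ (x :: (b1 ++ b2 ++ b3)) = (b0 ++ [x]) ++ b1 ++ b2 ++ b3 by simp,
        ih (b0 ++ [x]) b1 b2 b3
          (fun y hy => by rcases List.mem_append.1 hy with hy | hy
                          · exact h0 y hy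
                          · simp at hy; simp [hy, hk]) h1 h2 h3 ht]
      simp
    · have hins : PySem.List.insertBy (fun a b => decide (pvK a < pvK b)) x
          (b0 ++ b1 ++ b2 ++ b3) = (b0 ++ b1) ++ (x :: (b2 ++ b3)) := by
        rw [show b0 ++ b1 ++ b2 ++ b3 = (b0 ++ b1) ++ (b2 ++ b3) by simp,
          insertBy_append_of_not_before _ _ _ _
            (fun y hy => by
              rcases List.mem_append.1 hy with hy | hy
              · simp [hk, h0 y hy]
              · simp [hk, h1 y hy]),
          insertBy_cons_of_before _ _ _
            (fun y hy => by
              rcases List.mem_append.1 hy with hy | hy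
              · simp [hk, h2 y hy]
              · simp [hk, h3 y hy])]
      rw [hins, show (b0 ++ b1) ++ (x :: (b2 ++ b3)) = b0 ++ (b1 ++ [x]) ++ b2 ++ b3 by simp,
        ih b0 (b1 ++ [x]) b2 b3 h0
          (fun y hy => by rcases List.mem_append.1 hy with hy | hy
                          · exact h1 y hy
                          · simp at hy; simp [hy, hk]) h2 h3 ht]
      simp
    · have hins : PySem.List.insertBy (fun a b => decide (pvK a < pvK b)) x
          (b0 ++ b1 ++ b2 ++ b3) = (b0 ++ b1 ++ b2) ++ (x :: b3) := by
        rw [show b0 ++ b1 ++ b2 ++ b3 = (b0 ++ b1 ++ b2) ++ b3 by simp,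
          insertBy_append_of_not_before _ _ _ _
            (fun y hy => by
              rcases List.mem_append.1 hy with hy | hy
              · rcases List.mem_append.1 hy with hy | hy
                · simp [hk, h0 y hy]
                · simp [hk, h1 y hy]
              · simp [hk, h2 y hy]),
          insertBy_cons_of_before _ _ _ (fun y hy => by simp [hk, h3 y hy])]
      rw [hins, show (b0 ++ b1 ++ b2) ++ (x :: b3) = b0 ++ b1 ++ (b2 ++ [x]) ++ b3 by simp,
        ih b0 b1 (b2 ++ [x]) b3 h0 h1
          (fun y hy => by rcases List.mem_append.1 hy with hy | hy
                          · exact h2 y hy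
                          · simp at hy; simp [hy, hk]) h3 ht]
      simp
    · have hins : PySem.List.insertBy (fun a b => decide (pvK a < pvK b)) x
          (b0 ++ b1 ++ b2 ++ b3) = (b0 ++ b1 ++ b2 ++ b3) ++ [x] := by
        apply PySem.List.insertBy_of_forall_not_before
        intro y hy
        rcases List.mem_append.1 hy with hy | hy
        · rcases List.mem_append.1 hy with hy | hy
          · rcases List.mem_append.1 hy with hy | hy
            · simp [hk, h0 y hy]
            · simp [hk, h1 y hy]
          · simp [hk, h2 y hy]
        · simp [hk, h3 y hy]
      rw [hins, show (b0 ++ b1 ++ b2 ++ b3) ++ [x] = b0 ++ b1 ++ b2 ++ (b3 ++ [x]) by simp,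
        ih b0 b1 b2 (b3 ++ [x]) h0 h1 h2
          (fun y hy => by rcases List.mem_append.1 hy with hy | hy
                          · exact h3 y hy
                          · simp at hy; simp [hy, hk]) ht]
      simp

-- B's sort, characterised as the four key-filtered sublists in key order
lemma sorted_eq_buckets (l : List String) (hl : ∀ x ∈ l, pvK x < 4) :
    PySem.List.sorted l pvK false =
      l.filter (fun s => pvK s == 0) ++ l.filter (fun s => pvK s == 1) ++
      l.filter (fun s => pvK s == 2) ++ l.filter (fun s => pvK s == 3) := by
  rw [PySem.List.sorted_eq_foldl_insertBy]
  have := foldl_insert_buckets l [] [] [] [] (by simp) (by simp) (by simp) (by simp) hl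
  simpa using this

-- filtering by a key value < 4 already implies the isSome filter of B
lemma filter_key_filter_isSome (arr : List String) (j : Int) (hj : j < 4) :
    (arr.filter (fun s => (pvCat? s).isSome)).filter (fun s => pvK s == j) =
      arr.filter (fun s => pvK s == j) := by
  rw [List.filter_filter]
  apply List.filter_congr
  intro x _
  by_cases h : pvK x = j
  · simp [h, isSome_of_pvK_lt x (h ▸ hj)]
  · simp [h]

-- ===== VERDICT (by name: the statement is the Claim_ definition above) =====
theorem sorting_patient_weight_spec : Claim_equal_sorting_patient_weight := by
  intro arr _
  show sorting_patient_weight arr = sorting_patient_weight_alt arr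
  unfold sorting_patient_weight sorting_patient_weight_alt
  unfold pvRowsA
  rw [PySem.List.foldl_pyRange_pyGetD arr "" pvStepA ([], [], [], []) (le_refl 0)]
  simp only [Int.toNat_zero, List.drop_zero]
  rw [loopA_filter arr [] [] [] []]
  have hsorted := sorted_eq_buckets (arr.filter (fun s => (pvCat? s).isSome))
    (fun x hx => pvK_lt_of_isSome x (List.mem_filter.1 hx).2)
  rw [show (fun s => (pvCat? s).getD 4) = pvK from rfl, hsorted]
  rw [filter_key_filter_isSome arr 0 (by norm_num),
      filter_key_filter_isSome arr 1 (by norm_num),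
      filter_key_filter_isSome arr 2 (by norm_num),
      filter_key_filter_isSome arr 3 (by norm_num)]
  simp
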